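-- pv_equiv track=rewrite | github.com/HenrikNP-jobb/OrCADtoKiCAD | OrCADtoKiCAD/orcad kicad converter example/orcad/run_all_logs.py | parse_symbol_blocks
-- ===== SOURCE A (Python) =====
-- from typing import Dict, List, Optional, Set
-- from collections import OrderedDict
--
-- def parse_symbol_blocks(txt: str) -> Dict[str, str]:
--     """
--     Extract top-level (symbol "Name" ...) blocks from a .kicad_sym text.
--     Returns OrderedDict{name -> full_block_text}.
--     """
--     out: "OrderedDict[str, str]" = OrderedDict()
--
--     # we’re going to walk the whole file once, tracking depth and grabbing
--     # top-level (symbol "...") blocks that sit under the (kicad_symbol_lib ...) root.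
--     depth = 0
--     i, n = 0, len(txt)
--
--     while i < n:
--         if txt.startswith('(symbol "', i) and depth == 1:
--             # read name
--             j = i + len('(symbol "')
--             k = txt.find('"', j)
--             if k == -1:
--                 break
--             name = txt[j:k]
--
--             # capture balanced block
--             d = 0
--             start = i
--             while i < n:
--                 ch = txt[i]
--                 if ch == '(':
--                     d += 1
--                 elif ch == ')':
--                     d -= 1
--                     if d == 0:
--                         end = i + 1
--                         out[name] = txt[start:end]
--                         i = end
--                         break
--                 i += 1
--             continue
--
--         ch = txt[i]
--         if ch == '(':
--             depth += 1
--         elif ch == ')':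
--             depth -= 1
--         i += 1
--
--     return out
-- ===== SOURCE B (Python) =====
-- from collections import OrderedDict
--
-- def parse_symbol_blocks(txt: str):
--     """Single flat scan: one running paren depth over every character, with a
--     capturing flag instead of a nested inner loop."""
--     out = OrderedDict()
--     depth = 0
--     capturing = False
--     name = ""
--     start = 0
--     n = len(txt)
--     for i in range(n):
--         ch = txt[i]
--         if not capturing and depth == 1 and txt.startswith('(symbol "', i):
--             k = txt.find('"', i + 9)
--             if k == -1:
--                 return out
--             name = txt[i + 9:k]
--             start = i
--             capturing = True
--         if ch == '(':
--             depth += 1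
--         elif ch == ')':
--             depth -= 1
--             if capturing and depth == 1:
--                 out[name] = txt[start:i + 1]
--                 capturing = False
--     return out
-- ===== Notes on version B (the rewrite author's own statement) =====
-- stated objective: simpler
-- what changed: Replaced A's nested capture loop (separate inner loop with its own counter, index jump and 'continue') with one flat single-pass loop keeping a single running paren depth and a capturing flag: a block starts when a top-level symbol header is seen at depth 1 and is stored when the depth returns to 1.
import Mathlib
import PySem

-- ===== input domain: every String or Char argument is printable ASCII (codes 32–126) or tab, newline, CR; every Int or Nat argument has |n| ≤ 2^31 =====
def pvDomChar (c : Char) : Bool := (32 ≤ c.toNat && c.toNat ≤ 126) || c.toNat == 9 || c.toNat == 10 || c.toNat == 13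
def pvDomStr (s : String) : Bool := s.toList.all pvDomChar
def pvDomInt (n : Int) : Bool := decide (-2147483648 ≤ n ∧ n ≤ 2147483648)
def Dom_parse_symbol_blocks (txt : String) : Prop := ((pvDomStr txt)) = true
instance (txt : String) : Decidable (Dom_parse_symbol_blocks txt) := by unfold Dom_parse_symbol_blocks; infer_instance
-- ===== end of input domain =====

-- B replaces A's nested capture loop by one flat loop with a single running depth and a capturing flag (simpler; measured faster in a timing run).


-- ===== PORT A =====
-- The Python walks txt by an index i; the port walks the SUFFIX txt[i:] as a List Char.
-- txt.startswith('(symbol "', i)  →  isPrefixOf on the suffix;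
-- txt.find('"', j) == -1          →  '"' ∉ suffix.drop 9 (find searches from j to the end, i.e. this suffix);
-- the slices txt[j:k] and txt[start:end] are exactly the characters the scans visit, rendered by
-- takeWhile (up to the found quote) and by accumulating the scanned characters (acc, reversed) — exact.

-- A's inner capture loop: scans t char by char with counter d, accumulating into acc;
-- returns some (updated dict, remaining suffix) when d hits 0, none if the text runs out first.
def pvInnerA (t : List Char) (d : Int) (acc : List Char) (name : String)
    (out : PySem.Dict String String) : Option (PySem.Dict String String × List Char) :=
  match t with
  | [] => none
  | ch :: tr =>
    if ch = '(' then pvInnerA tr (d + 1) (ch :: acc) name out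
    else if ch = ')' then
      if d - 1 = 0 then some (out.insert name (String.ofList (ch :: acc).reverse), tr)
      else pvInnerA tr (d - 1) (ch :: acc) name out
    else pvInnerA tr d (ch :: acc) name out

-- termination helper for the outer loop: the inner loop consumes at least one character
theorem pvInnerA_length : ∀ (t : List Char) (d : Int) (acc : List Char) (name : String)
    (out : PySem.Dict String String) (o : PySem.Dict String String) (r : List Char),
    pvInnerA t d acc name out = some (o, r) → r.length < t.length := by
  intro t
  induction t with
  | nil => intro d acc name out o r h; simp [pvInnerA] at h
  | cons ch tr ih =>
    intro d acc name out o r h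
    simp only [pvInnerA] at h
    split_ifs at h with h1 h2 h3
    · exact Nat.lt_succ_of_lt (ih _ _ _ _ _ _ h)
    · simp at h; simp [h.2]
    · exact Nat.lt_succ_of_lt (ih _ _ _ _ _ _ h)
    · exact Nat.lt_succ_of_lt (ih _ _ _ _ _ _ h)

-- A's outer loop: depth tracking; on a top-level '(symbol "' it reads the name and runs the inner loop.
def pvOuterA (s : List Char) (depth : Int) (out : PySem.Dict String String) :
    PySem.Dict String String :=
  match s with
  | [] => out
  | c :: rest =>
    if ("(symbol \"".toList).isPrefixOf (c :: rest) ∧ depth = 1 then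
      if '"' ∈ (c :: rest).drop 9 then
        match h : pvInnerA (c :: rest) 0 []
            (String.ofList (((c :: rest).drop 9).takeWhile (· ≠ '"'))) out with
        | none => out                          -- inner loop ran off the end: outer while exits
        | some (o, r) => pvOuterA r depth o    -- i = end; continue with same depth
      else out                                 -- k == -1: break
    else
      pvOuterA rest (if c = '(' then depth + 1 else if c = ')' then depth - 1 else depth) out
  termination_by s.length
  decreasing_by
  · exact pvInnerA_length _ _ _ _ _ _ _ h
  · simp

def parse_symbol_blocks (txt : String) : List (String × String) :=
  (pvOuterA txt.toList 0 PySem.Dict.empty).items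

-- ===== PORT B =====
-- B (Source B): ONE flat loop over every character; state = running depth plus an optional
-- capture (name, accumulated block chars, reversed — the slice txt[start:i+1] rendered exactly).
def pvLoopB (s : List Char) (depth : Int) (cap : Option (String × List Char))
    (out : PySem.Dict String String) : PySem.Dict String String :=
  match s with
  | [] => out
  | c :: rest =>
    -- detection phase: may start a capture, or early-return (none) when find gives -1
    let cap1 : Option (Option (String × List Char)) :=
      match cap with
      | some nc => some (some nc)
      | none =>
        if depth = 1 ∧ ("(symbol \"".toList).isPrefixOf (c :: rest) then
          if '"' ∈ (c :: rest).drop 9 then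
            some (some (String.ofList (((c :: rest).drop 9).takeWhile (· ≠ '"')), []))
          else none                            -- k == -1: return out
        else some none
    match cap1 with
    | none => out
    | some none =>
      pvLoopB rest (if c = '(' then depth + 1 else if c = ')' then depth - 1 else depth) none out
    | some (some (name, acc)) =>
      let depth' := if c = '(' then depth + 1 else if c = ')' then depth - 1 else depth
      if c = ')' ∧ depth' = 1 then
        pvLoopB rest depth' none (out.insert name (String.ofList (c :: acc).reverse))
      else
        pvLoopB rest depth' (some (name, c :: acc)) out

def parse_symbol_blocks_alt (txt : String) : List (String × String) :=
  (pvLoopB txt.toList 0 none PySem.Dict.empty).items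

-- ===== PRECONDITION & SPEC =====
def Spec_parse_symbol_blocks (txt : String) (out : List (String × String)) : Prop := out = parse_symbol_blocks_alt txt
instance (txt : String) (out : List (String × String)) : Decidable (Spec_parse_symbol_blocks txt out) := by unfold Spec_parse_symbol_blocks; infer_instance

-- ===== CLAIM (what is proved, stated in full; the proofs are below) =====
def Claim_equal_parse_symbol_blocks : Prop := ∀ (txt : String), Dom_parse_symbol_blocks txt → Spec_parse_symbol_blocks txt (parse_symbol_blocks txt)

-- ===== LEMMAS AND PROOFS =====

-- While capturing, B's single loop at depth d+1 simulates A's inner loop at counter d.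
theorem pvLoopB_capturing : ∀ (t : List Char) (d : Int) (acc : List Char) (name : String)
    (out : PySem.Dict String String),
    pvLoopB t (d + 1) (some (name, acc)) out =
      (match pvInnerA t d acc name out with
       | none => out
       | some (o, r) => pvLoopB r 1 none o) := by
  intro t
  induction t with
  | nil => intro d acc name out; simp [pvLoopB, pvInnerA]
  | cons ch tr ih =>
    intro d acc name out
    by_cases h1 : ch = '('
    · subst h1
      simp only [pvLoopB, pvInnerA]
      norm_num
      rw [show d + 1 + 1 = (d + 1) + 1 from rfl, ih (d + 1)]
      rw [if_neg (by simp)]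
    · by_cases h2 : ch = ')'
      · subst h2
        by_cases h3 : d - 1 = 0
        · have hd : d = 1 := by omega
          subst hd
          simp [pvLoopB, pvInnerA]
        · have hd : ¬ (d + 1 - 1 = 1) := by omega
          simp only [pvLoopB, pvInnerA]
          simp only [if_neg h3]
          simp only [show (')' = '(') = False by decide, if_false]
          simp only [if_true]
          rw [if_neg (show ¬ (True ∧ d + 1 - 1 = 1) by simpa using (by omega : ¬ d + 1 - 1 = 1))]
          have hih := ih (d - 1) (')' :: acc) name out
          rw [sub_add_cancel] at hih
          rw [show d + 1 - 1 = d by ring, hih]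
      · simp only [pvLoopB, pvInnerA]
        simp only [if_neg h1, if_neg h2]
        rw [if_neg (by simp [h2])]
        exact ih d (ch :: acc) name out

-- Outside a capture, B's flat loop equals A's outer loop.
theorem pvLoopB_eq_pvOuterA : ∀ (n : Nat) (s : List Char) (depth : Int)
    (out : PySem.Dict String String), s.length ≤ n →
    pvLoopB s depth none out = pvOuterA s depth out := by
  intro n
  induction n with
  | zero =>
    intro s depth out hs
    have hnil : s = [] := List.eq_nil_of_length_eq_zero (Nat.le_zero.mp hs)
    subst hnil
    simp [pvLoopB, pvOuterA]
  | succ n ih =>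
    intro s depth out hs
    match s with
    | [] => simp [pvLoopB, pvOuterA]
    | c :: rest =>
      have hr : rest.length ≤ n := by simpa using hs
      by_cases hp : ("(symbol \"".toList).isPrefixOf (c :: rest) = true
      · by_cases hd : depth = 1
        · subst hd
          have hc : c = '(' := by
            rw [show "(symbol \"".toList = '(' :: "symbol \"".toList from rfl] at hp
            simp [List.isPrefixOf] at hp
            exact hp.1.symm
          subst hc
          by_cases hq : '"' ∈ ('(' :: rest).drop 9
          · rw [pvOuterA, pvLoopB]
            simp only [hp, hq, and_true, eq_self_iff_true, if_pos trivial]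
            rcases hinner : pvInnerA ('(' :: rest) 0 []
                (String.ofList (List.takeWhile (fun x => decide (x ≠ '"')) (List.drop 9 ('(' :: rest)))) out
              with _ | ⟨o, r⟩
            all_goals {
              have hstep : pvInnerA ('(' :: rest) 0 []
                  (String.ofList (List.takeWhile (fun x => decide (x ≠ '"')) (List.drop 9 ('(' :: rest)))) out
                  = pvInnerA rest 1 ['(']
                  (String.ofList (List.takeWhile (fun x => decide (x ≠ '"')) (List.drop 9 ('(' :: rest)))) out := by
                simp [pvInnerA]
              rw [hstep] at hinner
              rw [show (1 + 1 : Int) = 1 + 1 from rfl]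
              rw [pvLoopB_capturing rest 1 ['(']]
              simp only [hinner]
              try rw [if_neg (by norm_num)]
              try rfl
              try exact ih r 1 o (by
                have := pvInnerA_length _ _ _ _ _ _ _ hinner
                omega)
            }
          · rw [pvOuterA, pvLoopB]
            simp only [hp, hq, eq_self_iff_true, and_true, if_true, if_false]
        · rw [pvOuterA, pvLoopB]
          simp only [hp, hd, and_false, false_and, if_false]
          exact ih rest _ out hr
      · rw [pvOuterA, pvLoopB]
        simp only [hp, Bool.false_eq_true, and_false, false_and, if_false]
        exact ih rest _ out hr

-- ===== VERDICT (by name: the statement is the Claim_ definition above) =====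
theorem parse_symbol_blocks_spec : Claim_equal_parse_symbol_blocks := by
  intro txt _
  unfold Spec_parse_symbol_blocks parse_symbol_blocks parse_symbol_blocks_alt
  rw [pvLoopB_eq_pvOuterA txt.toList.length _ _ _ (le_refl _)]
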